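-- pv_equiv track=rewrite | github.com/Nynia/wcpwdgen | app/utils/search.py | naive_string_match
-- ===== SOURCE A (Python) =====
-- def naive_string_match(T, P, idx=-1):
--     n = len(T)
--     m = len(P)
--
--     for s in range(0, n - m + 1):
--         k = 0
--         for i in range(0, m):
--             if T[s + i] != P[i] and idx != i:
--                 break
--             else:
--                 k += 1
--         if k == m:
--             return s
--     return -1
-- ===== SOURCE B (Python) =====
-- def naive_string_match(T, P, idx=-1):
--     n, m = len(T), len(P)
--     if not (0 <= idx < m):
--         # no reachable wildcard position: plain leftmost substring search
--         return T.find(P)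
--     pre, suf = P[:idx], P[idx + 1:]
--     s = T.find(pre)
--     while 0 <= s <= n - m:
--         if T[s + idx + 1:s + m] == suf:
--             return s
--         s = T.find(pre, s + 1)
--     return -1
-- ===== Notes on version B (the rewrite author's own statement) =====
-- stated objective: faster
-- what changed: Instead of re-testing every shift character by character with a break/counter loop, B splits the pattern at the wildcard into pre and suf, jumps between occurrences of pre via str.find, and checks suf with one slice comparison (plain T.find(P) when the wildcard index is out of range).
import Mathlib
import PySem

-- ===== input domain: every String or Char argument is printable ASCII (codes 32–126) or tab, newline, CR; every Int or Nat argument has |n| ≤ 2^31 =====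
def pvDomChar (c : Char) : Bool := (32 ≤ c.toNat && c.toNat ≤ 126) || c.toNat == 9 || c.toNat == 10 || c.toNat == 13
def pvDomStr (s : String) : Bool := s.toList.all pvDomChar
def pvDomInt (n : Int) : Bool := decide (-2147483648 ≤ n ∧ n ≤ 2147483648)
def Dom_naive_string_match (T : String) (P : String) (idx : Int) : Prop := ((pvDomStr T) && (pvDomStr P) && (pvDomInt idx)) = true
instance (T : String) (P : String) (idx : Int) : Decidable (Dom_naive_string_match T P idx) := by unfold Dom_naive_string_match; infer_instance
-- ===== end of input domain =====

-- B replaces A's shift-by-shift character loop by splitting the pattern at the wildcard and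
-- scanning only the occurrences of the pre-wildcard half found by str.find (alternative algorithm).

-- ===== PORT A =====
-- inner loop 'for i in range(0, m)' with its break, accumulator k
def nsmInner (tl pl : List Char) (idx s : Int) : List Int → Int → Int
  | [], k => k
  | i :: rest, k =>
    if PySem.List.pyGetD tl (s + i) ' ' ≠ PySem.List.pyGetD pl i ' ' ∧ idx ≠ i then k
    else nsmInner tl pl idx s rest (k + 1)

-- outer loop 'for s in range(0, n - m + 1)' with the early return
def nsmOuter (tl pl : List Char) (idx : Int) : List Int → Int
  | [] => -1
  | s :: rest =>
    if nsmInner tl pl idx s (PySem.List.pyRange 0 (pl.length : Int)) 0 = (pl.length : Int) then s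
    else nsmOuter tl pl idx rest

def naive_string_match (T : String) (P : String) (idx : Int) : Int :=
  nsmOuter T.toList P.toList idx
    (PySem.List.pyRange 0 ((T.toList.length : Int) - (P.toList.length : Int) + 1))

-- ===== PORT B =====
-- the 'while 0 <= s <= n - m' loop of Source B; fuel bounds the iteration count (s strictly increases)
def nsmAltLoop (tl pre suf : List Char) (idx m n : Int) : Nat → Int → Int
  | 0, _ => -1
  | fuel + 1, s =>
    if 0 ≤ s ∧ s ≤ n - m then
      if PySem.List.slice tl (some (s + idx + 1)) (some (s + m)) = suf then s
      else nsmAltLoop tl pre suf idx m n fuel (PySem.Chars.findFrom tl pre (s + 1) none)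
    else -1

def naive_string_match_alt (T : String) (P : String) (idx : Int) : Int :=
  let tl := T.toList
  let pl := P.toList
  let n : Int := tl.length
  let m : Int := pl.length
  if 0 ≤ idx ∧ idx < m then
    let pre := PySem.List.slice pl none (some idx)
    let suf := PySem.List.slice pl (some (idx + 1)) none
    nsmAltLoop tl pre suf idx m n (tl.length + 1) (PySem.Chars.find tl pre)
  else
    PySem.Chars.find tl pl

-- ===== PRECONDITION & SPEC =====
def Spec_naive_string_match (T : String) (P : String) (idx : Int) (out : Int) : Prop := out = naive_string_match_alt T P idx
instance (T : String) (P : String) (idx : Int) (out : Int) : Decidable (Spec_naive_string_match T P idx out) := by unfold Spec_naive_string_match; infer_instance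

-- ===== CLAIM (what is proved, stated in full; the proofs are below) =====
def Claim_equal_naive_string_match : Prop := ∀ (T : String) (P : String) (idx : Int), Dom_naive_string_match T P idx → Spec_naive_string_match T P idx (naive_string_match T P idx)

-- ===== LEMMAS AND PROOFS =====

-- proof-side reference: does the pattern match at shift s (position idx wildcarded)?
def matchB (tl pl : List Char) (idx : Int) (s : Nat) : Bool :=
  decide (∀ i, i < pl.length → (tl[s + i]? = pl[i]? ∨ idx = (i : Int)))

-- proof-side reference: first shift j ≤ … < K with matchB, else -1
def ansFrom (tl pl : List Char) (idx : Int) (K : Nat) (j : Nat) : Int :=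
  if h : j < K then
    if matchB tl pl idx j then (j : Int) else ansFrom tl pl idx K (j + 1)
  else -1
termination_by K - j

lemma matchB_true_iff (tl pl : List Char) (idx : Int) (s : Nat) :
    matchB tl pl idx s = true ↔ ∀ i, i < pl.length → (tl[s + i]? = pl[i]? ∨ idx = (i : Int)) := by
  simp [matchB]

lemma inner_eq_iff (tl pl : List Char) (idx : Int) (s : Nat)
    (hs : s + pl.length ≤ tl.length) :
    ∀ d j, j + d = pl.length →
      (nsmInner tl pl idx (s : Int) (PySem.List.pyRange (j : Int) (pl.length : Int)) (j : Int)
          = (pl.length : Int)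
        ↔ ∀ i, j ≤ i → i < pl.length → (tl[s + i]? = pl[i]? ∨ idx = (i : Int))) := by
  intro d
  induction d with
  | zero =>
    intro j hj
    obtain rfl : j = pl.length := by omega
    have hempty : PySem.List.pyRange ((pl.length : Nat) : Int) ((pl.length : Nat) : Int) = [] := by
      rw [PySem.List.pyRange_one]; simp
    rw [hempty]
    simp only [nsmInner]
    constructor
    · intro _ i h1 h2; exact absurd h2 (by omega)
    · intro _; trivial
  | succ d ih =>
    intro j hj
    have hjm : j < pl.length := by omega
    have hsj : s + j < tl.length := by omega
    rw [PySem.List.pyRange_one_cons (by exact_mod_cast hjm)]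
    have e1 : PySem.List.pyGetD tl ((j : Int) + (s : Int)) ' ' = tl[s + j] := by
      rw [show ((j : Int) + (s : Int)) = (((s + j : Nat)) : Int) by push_cast; ring]
      rw [PySem.List.pyGetD_natCast]
      simp [List.getD_eq_getElem?_getD, List.getElem?_eq_getElem hsj]
    have e2 : PySem.List.pyGetD pl ((j : Nat) : Int) ' ' = pl[j] := by
      rw [PySem.List.pyGetD_natCast]
      simp [List.getD_eq_getElem?_getD, List.getElem?_eq_getElem hjm]
    have eq1 : (tl[s + j]? = pl[j]?) ↔ tl[s + j] = pl[j] := by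
      rw [List.getElem?_eq_getElem hsj, List.getElem?_eq_getElem hjm]
      exact Option.some_inj
    simp only [nsmInner, show (s : Int) + (j : Int) = (j : Int) + (s : Int) by ring, e1, e2]
    by_cases hgood : tl[s + j] = pl[j] ∨ idx = (j : Int)
    · rw [if_neg (show ¬(tl[s + j] ≠ pl[j] ∧ idx ≠ (j : Int)) by
        rintro ⟨hne, hni⟩; rcases hgood with h | h; exacts [hne h, hni h])]
      have ecast : (j : Int) + 1 = (((j + 1 : Nat)) : Int) := by push_cast; ring
      rw [ecast]
      rw [ih (j + 1) (by omega)]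
      constructor
      · intro h i h1 h2
        rcases Nat.eq_or_lt_of_le h1 with rfl | hlt
        · rcases hgood with hc | hc
          · exact Or.inl (eq1.mpr hc)
          · exact Or.inr hc
        · exact h i (by omega) h2
      · intro h i h1 h2
        exact h i (by omega) h2
    · have hgood' : tl[s + j] ≠ pl[j] ∧ idx ≠ (j : Int) := by
        constructor <;> (intro hc; exact hgood (by first | exact Or.inl hc | exact Or.inr hc))
      rw [if_pos hgood']
      constructor
      · intro h
        exfalso
        have : j = pl.length := by exact_mod_cast h
        omega
      · intro h
        exfalso
        rcases h j le_rfl hjm with hc | hc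
        · exact hgood'.1 (eq1.mp hc)
        · exact hgood'.2 hc

lemma ansFrom_skip (tl pl : List Char) (idx : Int) (K : Nat) :
    ∀ d p q, p + d = q → p ≤ q →
      (∀ t, p ≤ t → t < q → t < K → matchB tl pl idx t = false) →
      ansFrom tl pl idx K p = ansFrom tl pl idx K q := by
  intro d
  induction d with
  | zero =>
    intro p q hpq _ _
    obtain rfl : q = p := by omega
    rfl
  | succ n ih =>
    intro p q hpq hle hall
    by_cases hpK : p < K
    · have h1 : matchB tl pl idx p = false := hall p le_rfl (by omega) hpK
      have e1 : ansFrom tl pl idx K p = ansFrom tl pl idx K (p + 1) := by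
        rw [ansFrom]; simp [hpK, h1]
      rw [e1]
      exact ih (p + 1) q (by omega) (by omega) (fun t ht1 ht2 ht3 => hall t (by omega) ht2 ht3)
    · have e1 : ansFrom tl pl idx K p = -1 := by rw [ansFrom]; simp [hpK]
      have e2 : ansFrom tl pl idx K q = -1 := by rw [ansFrom]; simp [show ¬ q < K by omega]
      rw [e1, e2]

lemma ansFrom_eq_neg_one (tl pl : List Char) (idx : Int) (K p : Nat)
    (h : ∀ t, p ≤ t → t < K → matchB tl pl idx t = false) :
    ansFrom tl pl idx K p = -1 := by
  by_cases hpK : p < K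
  · have e := ansFrom_skip tl pl idx K (K - p) p K (by omega) (by omega)
      (fun t h1 _ h3 => h t h1 h3)
    rw [e, ansFrom]; simp
  · rw [ansFrom]; simp [hpK]

lemma ansFrom_eq_self (tl pl : List Char) (idx : Int) (K p : Nat)
    (hp : p < K) (hm : matchB tl pl idx p = true) :
    ansFrom tl pl idx K p = (p : Int) := by
  rw [ansFrom]; simp [hp, hm]

lemma outer_eq (tl pl : List Char) (idx : Int) (K : Nat)
    (hK : ∀ s, s < K → s + pl.length ≤ tl.length) :
    ∀ d j, j + d = K →
      nsmOuter tl pl idx (PySem.List.pyRange (j : Int) (K : Int)) = ansFrom tl pl idx K j := by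
  intro d
  induction d with
  | zero =>
    intro j hj
    obtain rfl : j = K := by omega
    have hempty : PySem.List.pyRange ((j : Nat) : Int) ((j : Nat) : Int) = [] := by
      rw [PySem.List.pyRange_one]; simp
    rw [hempty]
    simp only [nsmOuter]
    rw [ansFrom]; simp
  | succ d ih =>
    intro j hj
    have hjK : j < K := by omega
    rw [PySem.List.pyRange_one_cons (by exact_mod_cast hjK)]
    simp only [nsmOuter]
    have hsm : j + pl.length ≤ tl.length := hK j hjK
    have hin := inner_eq_iff tl pl idx j hsm pl.length 0 (by omega)
    rw [show ((0 : Nat) : Int) = (0 : Int) by simp] at hin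
    have hmb : (nsmInner tl pl idx (j : Int) (PySem.List.pyRange 0 (pl.length : Int)) 0
        = (pl.length : Int)) ↔ matchB tl pl idx j := by
      rw [hin, matchB_true_iff]
      constructor
      · intro h i hi; exact h i (by omega) hi
      · intro h i _ hi; exact h i hi
    by_cases hm : matchB tl pl idx j
    · rw [if_pos (hmb.mpr hm)]
      rw [ansFrom_eq_self tl pl idx K j hjK hm]
    · rw [if_neg (fun hc => hm (hmb.mp hc))]
      rw [show ((j : Int) + 1) = (((j + 1 : Nat)) : Int) by push_cast; ring]
      rw [ih (j + 1) (by omega)]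
      conv_rhs => rw [ansFrom]
      simp [hjK, hm]

-- no-wildcard case: matchB is exactly "pl is a prefix of tl.drop s"
lemma matchB_iff_prefix (tl pl : List Char) (idx : Int)
    (hidx : ¬ (0 ≤ idx ∧ idx < (pl.length : Int))) (s : Nat) :
    matchB tl pl idx s = true ↔ pl <+: tl.drop s := by
  rw [matchB_true_iff, List.prefix_iff_getElem?]
  constructor
  · intro h i hi
    rcases h i hi with hc | hc
    · rw [List.getElem?_drop, hc, List.getElem?_eq_getElem hi]
    · exfalso
      apply hidx
      refine ⟨by omega, ?_⟩
      subst hc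
      exact_mod_cast hi
  · intro h i hi
    left
    have := h i hi
    rw [List.getElem?_drop] at this
    rw [this, List.getElem?_eq_getElem hi]

-- wildcard case: matchB splits into the two halves of the pattern
lemma matchB_iff_split (tl pl : List Char) (idx : Int)
    (h0 : 0 ≤ idx) (h1 : idx < (pl.length : Int)) (s : Nat) :
    matchB tl pl idx s = true ↔
      (pl.take idx.toNat <+: tl.drop s ∧
       pl.drop (idx.toNat + 1) <+: tl.drop (s + idx.toNat + 1)) := by
  have hiN : idx.toNat < pl.length := by omega
  have hidxe : idx = (idx.toNat : Int) := by omega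
  rw [matchB_true_iff, List.prefix_iff_getElem?, List.prefix_iff_getElem?]
  constructor
  · intro h
    constructor
    · intro i hi
      have hi' : i < idx.toNat := by simp at hi; omega
      rcases h i (by omega) with hc | hc
      · rw [List.getElem?_drop, hc, List.getElem?_eq_getElem (show i < pl.length by omega)]
        congr 1
        exact (List.getElem_take).symm
      · exfalso; omega
    · intro i hi
      have hi' : i < pl.length - (idx.toNat + 1) := by simpa using hi
      rcases h (idx.toNat + 1 + i) (by omega) with hc | hc
      · rw [List.getElem?_drop]
        have e : s + (idx.toNat + 1) + i = s + (idx.toNat + 1 + i) := by omega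
        rw [show s + idx.toNat + 1 = s + (idx.toNat + 1) by omega, e, hc,
          List.getElem?_eq_getElem (show idx.toNat + 1 + i < pl.length by omega)]
        congr 1
        rw [List.getElem_drop]
      · exfalso; omega
  · rintro ⟨h1', h2'⟩ i hi
    rcases lt_trichotomy i idx.toNat with hlt | heq | hgt
    · left
      have := h1' i (by simp; omega)
      rw [List.getElem?_drop] at this
      rw [this, List.getElem?_eq_getElem hi]
      congr 1
      exact List.getElem_take
    · right; omega
    · left
      have hb : i - idx.toNat - 1 < (pl.drop (idx.toNat + 1)).length := by
        simp; omega
      have := h2' (i - idx.toNat - 1) hb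
      rw [List.getElem?_drop] at this
      have e1 : s + idx.toNat + 1 + (i - idx.toNat - 1) = s + i := by omega
      rw [e1] at this
      rw [this, List.getElem?_eq_getElem hi]
      congr 1
      rw [List.getElem_drop]
      congr 1
      omega

lemma prefix_drop_infix (tl pre : List Char) (p t : Nat) (hpt : p ≤ t)
    (h : pre <+: tl.drop t) : pre <:+: tl.drop p := by
  have e : tl.drop t = (tl.drop p).drop (t - p) := by
    rw [List.drop_drop]; congr 1; omega
  rw [e] at h
  exact List.infix_iff_prefix_suffix.mpr ⟨(tl.drop p).drop (t - p), h, List.drop_suffix _ _⟩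

lemma altLoop_eq (tl pl : List Char) (idx : Int)
    (h0 : 0 ≤ idx) (h1 : idx < (pl.length : Int)) :
    ∀ (fuel p : Nat), p ≤ tl.length → tl.length - p < fuel →
      nsmAltLoop tl (pl.take idx.toNat) (pl.drop (idx.toNat + 1)) idx
          (pl.length : Int) (tl.length : Int) fuel
          (PySem.Chars.findFrom tl (pl.take idx.toNat) (p : Int) none)
        = ansFrom tl pl idx (tl.length + 1 - pl.length) p := by
  have hiN : idx.toNat < pl.length := by omega
  intro fuel
  induction fuel with
  | zero => intro p _ hfuel; omega
  | succ f ih =>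
    intro p hp hfuel
    by_cases hf : PySem.Chars.find (tl.drop p) (pl.take idx.toNat) = -1
    · have hs : PySem.Chars.findFrom tl (pl.take idx.toNat) (p : Int) none = -1 := by
        rw [PySem.Chars.findFrom_natCast tl (pl.take idx.toNat) p hp]; simp [hf]
      rw [hs]
      simp only [nsmAltLoop]
      rw [if_neg (by rintro ⟨hc, _⟩; omega)]
      symm
      apply ansFrom_eq_neg_one
      intro t ht1 _
      by_contra hc
      simp only [Bool.not_eq_false] at hc
      have hpre : pl.take idx.toNat <+: tl.drop t :=
        ((matchB_iff_split tl pl idx h0 h1 t).mp hc).1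
      have hinf : pl.take idx.toNat <:+: tl.drop p := prefix_drop_infix tl _ p t ht1 hpre
      exact ((PySem.Chars.find_eq_neg_one_iff (tl.drop p) (pl.take idx.toNat)).mp hf) hinf
    · have hsne : PySem.Chars.findFrom tl (pl.take idx.toNat) (p : Int) none ≠ -1 := by
        rw [PySem.Chars.findFrom_natCast tl (pl.take idx.toNat) p hp]
        have := PySem.Chars.neg_one_le_find (tl.drop p) (pl.take idx.toNat)
        simp only [hf, if_false]
        omega
      obtain ⟨hps, hpre, hmin⟩ := PySem.Chars.findFrom_natCast_spec tl (pl.take idx.toNat) p hp hsne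
      set s := PySem.Chars.findFrom tl (pl.take idx.toNat) (p : Int) none with hsdef
      have hs0 : 0 ≤ s := le_trans (by exact_mod_cast Nat.zero_le p) hps
      set sN := s.toNat with hsNdef
      have hse : s = (sN : Int) := by omega
      simp only [nsmAltLoop]
      by_cases hcond : s ≤ (tl.length : Int) - (pl.length : Int)
      · rw [if_pos ⟨hs0, hcond⟩]
        have hsnm : sN + pl.length ≤ tl.length := by omega
        have hsK : sN < tl.length + 1 - pl.length := by omega
        have hslice : PySem.List.slice tl (some (s + idx + 1)) (some (s + (pl.length : Int)))
            = (tl.drop (sN + idx.toNat + 1)).take (pl.length - idx.toNat - 1) := by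
          rw [PySem.List.slice_toNat tl (by omega) (by omega)]
          congr 1
          · omega
          · congr 1
            omega
        have hsufl : (pl.drop (idx.toNat + 1)).length = pl.length - idx.toNat - 1 := by
          simp
          omega
        by_cases hsl : PySem.List.slice tl (some (s + idx + 1)) (some (s + (pl.length : Int)))
            = pl.drop (idx.toNat + 1)
        · rw [if_pos hsl]
          have hsufpre : pl.drop (idx.toNat + 1) <+: tl.drop (sN + idx.toNat + 1) := by
            rw [List.prefix_iff_eq_take, hsufl]
            rw [hslice] at hsl
            exact hsl.symm
          have hmB : matchB tl pl idx sN = true :=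
            (matchB_iff_split tl pl idx h0 h1 sN).mpr ⟨hpre, hsufpre⟩
          have hskip : ansFrom tl pl idx (tl.length + 1 - pl.length) p
              = ansFrom tl pl idx (tl.length + 1 - pl.length) sN :=
            ansFrom_skip tl pl idx _ (sN - p) p sN (by omega) (by omega) (fun t ht1 ht2 _ => by
              by_contra hc
              simp only [Bool.not_eq_false] at hc
              exact hmin t ht1 ht2 ((matchB_iff_split tl pl idx h0 h1 t).mp hc).1)
          rw [hskip, ansFrom_eq_self tl pl idx _ sN hsK hmB, hse]
        · rw [if_neg hsl]
          have hmBf : matchB tl pl idx sN = false := by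
            by_contra hc
            simp only [Bool.not_eq_false] at hc
            have hsufpre := ((matchB_iff_split tl pl idx h0 h1 sN).mp hc).2
            rw [List.prefix_iff_eq_take, hsufl] at hsufpre
            rw [hslice] at hsl
            exact hsl hsufpre.symm
          rw [show s + 1 = (((sN + 1 : Nat)) : Int) by omega]
          rw [ih (sN + 1) (by omega) (by omega)]
          exact (ansFrom_skip tl pl idx _ (sN + 1 - p) p (sN + 1) (by omega) (by omega)
            (fun t ht1 ht2 _ => by
              by_contra hc
              simp only [Bool.not_eq_false] at hc
              rcases Nat.lt_succ_iff_lt_or_eq.mp ht2 with hlt | rfl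
              · exact hmin t ht1 hlt ((matchB_iff_split tl pl idx h0 h1 t).mp hc).1
              · simp [hmBf] at hc)).symm
      · rw [if_neg (by rintro ⟨_, hc⟩; exact hcond hc)]
        symm
        apply ansFrom_eq_neg_one
        intro t ht1 ht2
        have htS : t < sN := by omega
        by_contra hc
        simp only [Bool.not_eq_false] at hc
        exact hmin t ht1 htS ((matchB_iff_split tl pl idx h0 h1 t).mp hc).1

lemma find_eq_ansFrom (tl pl : List Char) (idx : Int)
    (hidx : ¬ (0 ≤ idx ∧ idx < (pl.length : Int))) :
    PySem.Chars.find tl pl = ansFrom tl pl idx (tl.length + 1 - pl.length) 0 := by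
  set K := tl.length + 1 - pl.length with hKdef
  by_cases hf : PySem.Chars.find tl pl = -1
  · rw [hf]
    symm
    apply ansFrom_eq_neg_one
    intro t _ _
    by_contra hc
    simp only [Bool.not_eq_false] at hc
    have hpre : pl <+: tl.drop t := (matchB_iff_prefix tl pl idx hidx t).mp hc
    have hinf : pl <:+: tl :=
      List.infix_iff_prefix_suffix.mpr ⟨tl.drop t, hpre, List.drop_suffix _ _⟩
    exact ((PySem.Chars.find_eq_neg_one_iff tl pl).mp hf) hinf
  · have hge : 0 ≤ PySem.Chars.find tl pl := by
      have := PySem.Chars.neg_one_le_find tl pl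
      omega
    obtain ⟨hpre, hmin⟩ := PySem.Chars.find_spec hge
    set f := (PySem.Chars.find tl pl).toNat with hfdef
    have hfl : pl.length ≤ (tl.drop f).length := hpre.length_le
    have hfn : f ≤ tl.length := by
      have := PySem.Chars.find_le_length tl pl
      omega
    have hfK : f < K := by
      simp only [List.length_drop] at hfl
      omega
    have hfe : PySem.Chars.find tl pl = (f : Int) := by omega
    have hskip : ansFrom tl pl idx K 0 = ansFrom tl pl idx K f :=
      ansFrom_skip tl pl idx K f 0 f (by omega) (by omega) (fun t _ h2 _ => by
        by_contra hc
        simp only [Bool.not_eq_false] at hc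
        exact hmin t h2 ((matchB_iff_prefix tl pl idx hidx t).mp hc))
    rw [hfe, hskip,
      ansFrom_eq_self tl pl idx K f hfK ((matchB_iff_prefix tl pl idx hidx f).mpr hpre)]

lemma pyRange_zero_congr (n m : Nat) :
    PySem.List.pyRange 0 ((n : Int) - (m : Int) + 1) = PySem.List.pyRange 0 ((n + 1 - m : Nat) : Int) := by
  rw [PySem.List.pyRange_one, PySem.List.pyRange_one]
  congr 2
  omega

lemma a_eq_ansFrom (tl pl : List Char) (idx : Int) :
    nsmOuter tl pl idx (PySem.List.pyRange 0 ((tl.length : Int) - (pl.length : Int) + 1))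
      = ansFrom tl pl idx (tl.length + 1 - pl.length) 0 := by
  rw [pyRange_zero_congr]
  have h := outer_eq tl pl idx (tl.length + 1 - pl.length) (by intro s hs; omega)
    (tl.length + 1 - pl.length) 0 (by omega)
  simpa using h

-- ===== VERDICT (by name: the statement is the Claim_ definition above) =====
theorem naive_string_match_spec : Claim_equal_naive_string_match := by
  intro T P idx _
  unfold Spec_naive_string_match naive_string_match naive_string_match_alt
  set tl := T.toList
  set pl := P.toList
  rw [a_eq_ansFrom]
  by_cases hidx : 0 ≤ idx ∧ idx < (pl.length : Int)
  · simp only [hidx, and_self, if_true]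
    rw [PySem.List.slice_to pl hidx.1, PySem.List.slice_from pl (by omega : (0:Int) ≤ idx + 1)]
    have hto : (idx + 1).toNat = idx.toNat + 1 := by omega
    rw [hto]
    have h := altLoop_eq tl pl idx hidx.1 hidx.2 (tl.length + 1) 0 (by omega) (by omega)
    rw [show ((0:Nat):Int) = (0:Int) by simp, PySem.Chars.findFrom_zero] at h
    exact h.symm
  · simp only [hidx, if_false]
    exact (find_eq_ansFrom tl pl idx hidx).symm
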